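-- pv_equiv track=rewrite | github.com/cbell98/Helper_Functions | module3.py | solution
-- ===== SOURCE A (Python) =====
-- def solution(s):
--     if s == "":
--         return ""
--     else:
--         newstring = ""
--         for char in s:
--             newstring += f"*{char}*"
--         return newstring
-- ===== SOURCE B (Python) =====
-- def solution(s):
--     if s == "":
--         return ""
--     return "*" + "**".join(s) + "*"
-- ===== Notes on version B (the rewrite author's own statement) =====
-- stated objective: idiomatic
-- what changed: Replaces the per-character loop that concatenates a wrapped copy of each character with a single closed-form expression: join the characters with a doubled-asterisk separator and add one leading and one trailing asterisk.
import Mathlib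
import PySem

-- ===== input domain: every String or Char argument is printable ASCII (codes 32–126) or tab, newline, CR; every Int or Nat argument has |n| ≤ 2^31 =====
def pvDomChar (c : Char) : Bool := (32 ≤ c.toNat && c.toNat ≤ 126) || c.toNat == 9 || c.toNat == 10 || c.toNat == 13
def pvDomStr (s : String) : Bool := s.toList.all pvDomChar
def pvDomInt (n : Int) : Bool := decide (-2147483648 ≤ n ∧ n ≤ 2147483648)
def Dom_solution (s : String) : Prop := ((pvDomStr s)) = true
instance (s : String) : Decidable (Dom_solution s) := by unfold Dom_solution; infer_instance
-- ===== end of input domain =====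

-- B builds the result in one closed-form expression ("*" + "**".join(s) + "*" with the empty-string
-- guard kept) instead of A's loop concatenating a wrapped copy of each character (objective: idiomatic).


-- ===== PORT A =====
-- 'for char in s: newstring += f"*{char}*"' : a left fold over the characters, appending
-- ['*', char, '*'] each step (exact: Python string concatenation = list-of-chars append).
def solution (s : String) : String :=
  if s == "" then ""
  else String.mk (s.toList.foldl (fun acc c => acc ++ ['*', c, '*']) [])

-- ===== PORT B =====
-- '"*" + "**".join(s) + "*"' : PySem.Chars.join with separator "**" over the singleton
-- characters of s, with one leading and one trailing '*'.
def solution_alt (s : String) : String :=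
  if s == "" then ""
  else String.mk ('*' :: PySem.Chars.join ['*', '*'] (s.toList.map (fun c => [c])) ++ ['*'])

-- ===== PRECONDITION & SPEC =====
def Spec_solution (s : String) (out : String) : Prop := out = solution_alt s
instance (s : String) (out : String) : Decidable (Spec_solution s out) := by unfold Spec_solution; infer_instance

-- ===== CLAIM (what is proved, stated in full; the proofs are below) =====
def Claim_equal_solution : Prop := ∀ (s : String), Dom_solution s → Spec_solution s (solution s)

-- ===== LEMMAS AND PROOFS =====
lemma foldA (cs : List Char) (acc : List Char) :
    cs.foldl (fun a c => a ++ ['*', c, '*']) acc = acc ++ cs.flatMap (fun c => ['*', c, '*']) := by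
  induction cs generalizing acc with
  | nil => simp
  | cons c cs ih => simp [List.foldl, ih]

lemma joinB (c : Char) (cs : List Char) :
    '*' :: PySem.Chars.join ['*', '*'] ((c :: cs).map (fun x => [x])) ++ ['*']
      = (c :: cs).flatMap (fun x => ['*', x, '*']) := by
  induction cs generalizing c with
  | nil => simp [PySem.Chars.join_singleton]
  | cons d cs ih =>
    simp only [List.map_cons] at ih ⊢
    rw [PySem.Chars.join_cons_cons]
    simp only [List.flatMap_cons] at ih ⊢
    simp only [← ih]
    simp

theorem solution_spec : Claim_equal_solution := by
  intro s _
  unfold Spec_solution solution solution_alt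
  by_cases h : s = ""
  · simp [h]
  · have hb : (s == "") = false := by simpa using h
    have hne : s.toList ≠ [] := by
      simpa using h
    rw [hb]
    simp only [Bool.false_eq_true, if_false]
    cases hl : s.toList with
    | nil => exact absurd hl hne
    | cons c cs =>
      rw [foldA, joinB]
      simp
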